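-- pv_equiv track=rewrite | github.com/MonashBioinformaticsPlatform/RSeQC | rseqc/qcmodule/bam_cigar.py | fetch_insertion
-- ===== SOURCE A (Python) =====
-- def fetch_insertion(chrom, st, cigar):
-- 	''' fetch insertion regions defined by cigar. st must be zero based
-- 	return list of tuple of (chrom,st, end)
--
-- 	NOTE: insertion region does NOT present in reference genome and there
-- 	fore cannot represented using reference coordinates[start, end]. So we
-- 	use [start, SIZE).
-- 	[(100,2)] means 2nt insert between 100 and 101
-- 	'''
-- 	#match = re.compile(r'(\d+)(\D)')
-- 	chrom_st = st
-- 	ins_bound =[]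
-- 	for c,s in cigar:	#code and size
-- 		if c==0:		#match
-- 			chrom_st += s
-- 		elif c==1:		#insertion to ref
-- 			ins_bound.append((chrom, chrom_st, s))
-- 			continue
-- 		elif c==2:		#deletion to ref
-- 			chrom_st += s
-- 		elif c==3:		#gap or intron
-- 			chrom_st += s
-- 		elif c==4:		#soft clipping. We do NOT include soft clip as part of exon
-- 			chrom_st += s
-- 		else:
-- 			continue
-- 	return ins_bound
-- ===== SOURCE B (Python) =====
-- def fetch_insertion(chrom, st, cigar):
--     """Two-pass re-implementation: exclusive prefix sums of reference
--     advances, then one comprehension picking out the insertion ops."""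
--     offsets = [0] * len(cigar)
--     total = 0
--     for i, (c, s) in enumerate(cigar):
--         offsets[i] = total
--         if c in (0, 2, 3, 4):
--             total += s
--     return [(chrom, st + offsets[i], s)
--             for i, (c, s) in enumerate(cigar) if c == 1]
-- ===== Notes on version B (the rewrite author's own statement) =====
-- stated objective: alternative
-- what changed: Replaced the single running-accumulator loop that appends insertions as it walks with a two-pass decomposition: first an exclusive prefix sum of reference advances (codes 0,2,3,4), then a comprehension over the ops zipped with those offsets that emits (chrom, st+offset, size) for each code-1 op.
import Mathlib
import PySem

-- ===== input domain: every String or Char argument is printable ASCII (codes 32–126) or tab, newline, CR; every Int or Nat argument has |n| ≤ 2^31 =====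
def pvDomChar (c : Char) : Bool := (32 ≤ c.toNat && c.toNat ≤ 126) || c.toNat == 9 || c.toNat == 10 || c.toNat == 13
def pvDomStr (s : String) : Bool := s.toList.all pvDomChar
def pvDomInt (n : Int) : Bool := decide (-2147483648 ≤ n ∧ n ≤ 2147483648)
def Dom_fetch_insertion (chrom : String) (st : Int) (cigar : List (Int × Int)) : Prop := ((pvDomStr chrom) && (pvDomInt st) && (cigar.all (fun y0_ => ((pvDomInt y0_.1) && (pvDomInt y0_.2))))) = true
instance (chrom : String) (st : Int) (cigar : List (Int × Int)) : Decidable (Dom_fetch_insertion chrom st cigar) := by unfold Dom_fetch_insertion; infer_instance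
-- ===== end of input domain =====

-- B replaces A's single running-accumulator loop with a two-pass decomposition (exclusive prefix sums of reference advances, then a filter over the zipped ops); objective: alternative, same O(n) cost.
-- ===== PORT A =====
def fetch_insertion (chrom : String) (st : Int) (cigar : List (Int × Int)) : List (String × Int × Int) :=
  (cigar.foldl (fun (acc : Int × List (String × Int × Int)) cs =>
      let c := cs.1; let s := cs.2
      if c = 0 then (acc.1 + s, acc.2)
      else if c = 1 then (acc.1, acc.2 ++ [(chrom, acc.1, s)])
      else if c = 2 then (acc.1 + s, acc.2)
      else if c = 3 then (acc.1 + s, acc.2)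
      else if c = 4 then (acc.1 + s, acc.2)
      else acc) (st, [])).2

-- ===== PORT B =====
-- exclusive prefix sums of the reference advances (codes 0,2,3,4), as in Source B's first pass
def pvOffsets (cigar : List (Int × Int)) : List Int :=
  (cigar.foldl (fun (acc : Int × List Int) cs =>
      (acc.1 + (if cs.1 = 0 ∨ cs.1 = 2 ∨ cs.1 = 3 ∨ cs.1 = 4 then cs.2 else 0),
       acc.2 ++ [acc.1])) (0, [])).2

def fetch_insertion_alt (chrom : String) (st : Int) (cigar : List (Int × Int)) : List (String × Int × Int) :=
  (cigar.zip (pvOffsets cigar)).filterMap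
    (fun p => if p.1.1 = 1 then some (chrom, st + p.2, p.1.2) else none)

-- ===== PRECONDITION & SPEC =====
def Spec_fetch_insertion (chrom : String) (st : Int) (cigar : List (Int × Int)) (out : List (String × Int × Int)) : Prop := out = fetch_insertion_alt chrom st cigar
instance (chrom : String) (st : Int) (cigar : List (Int × Int)) (out : List (String × Int × Int)) : Decidable (Spec_fetch_insertion chrom st cigar out) := by unfold Spec_fetch_insertion; infer_instance

-- ===== CLAIM (what is proved, stated in full; the proofs are below) =====
def Claim_equal_fetch_insertion : Prop := ∀ (chrom : String) (st : Int) (cigar : List (Int × Int)), Dom_fetch_insertion chrom st cigar → Spec_fetch_insertion chrom st cigar (fetch_insertion chrom st cigar)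

-- ===== LEMMAS AND PROOFS =====

-- ===== VERDICT (by name: the statement is the Claim_ definition above) =====
-- common recursive characterisation
def pvDelta (c s : Int) : Int := if c = 0 ∨ c = 2 ∨ c = 3 ∨ c = 4 then s else 0

def pvGo (chrom : String) (t : Int) : List (Int × Int) → List (String × Int × Int)
  | [] => []
  | (c, s) :: rest =>
    if c = 1 then (chrom, t, s) :: pvGo chrom t rest
    else pvGo chrom (t + pvDelta c s) rest

def pvOffs (t : Int) : List (Int × Int) → List Int
  | [] => []
  | (c, s) :: rest => t :: pvOffs (t + pvDelta c s) rest

lemma foldA_eq (chrom : String) (cigar : List (Int × Int)) :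
    ∀ (t : Int) (acc : List (String × Int × Int)),
    (cigar.foldl (fun (acc : Int × List (String × Int × Int)) cs =>
      let c := cs.1; let s := cs.2
      if c = 0 then (acc.1 + s, acc.2)
      else if c = 1 then (acc.1, acc.2 ++ [(chrom, acc.1, s)])
      else if c = 2 then (acc.1 + s, acc.2)
      else if c = 3 then (acc.1 + s, acc.2)
      else if c = 4 then (acc.1 + s, acc.2)
      else acc) (t, acc)).2 = acc ++ pvGo chrom t cigar := by
  induction cigar with
  | nil => intro t acc; simp [pvGo]
  | cons hd tl ih =>
    intro t acc
    obtain ⟨c, s⟩ := hd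
    rw [List.foldl_cons]
    by_cases h0 : c = 0
    · subst h0; simp only [if_pos rfl]; rw [ih]; simp [pvGo, pvDelta]
    by_cases h1 : c = 1
    · subst h1
      simp only [show ¬((1:Int) = 0) by decide, if_neg, if_pos rfl, ite_false, ite_true]
      rw [ih]
      simp [pvGo, pvDelta]
    by_cases h2 : c = 2
    · subst h2
      simp only [show ¬((2:Int) = 0) by decide, show ¬((2:Int) = 1) by decide,
        if_neg, if_pos rfl, ite_false, ite_true]
      rw [ih]; simp [pvGo, pvDelta]
    by_cases h3 : c = 3
    · subst h3
      simp only [show ¬((3:Int) = 0) by decide, show ¬((3:Int) = 1) by decide,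
        show ¬((3:Int) = 2) by decide, if_neg, if_pos rfl, ite_false, ite_true]
      rw [ih]; simp [pvGo, pvDelta]
    by_cases h4 : c = 4
    · subst h4
      simp only [show ¬((4:Int) = 0) by decide, show ¬((4:Int) = 1) by decide,
        show ¬((4:Int) = 2) by decide, show ¬((4:Int) = 3) by decide,
        if_neg, if_pos rfl, ite_false, ite_true]
      rw [ih]; simp [pvGo, pvDelta]
    · simp only [if_neg h0, if_neg h1, if_neg h2, if_neg h3, if_neg h4]
      rw [ih]
      simp [pvGo, pvDelta, h0, h1, h2, h3, h4]

lemma foldP_eq (cigar : List (Int × Int)) :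
    ∀ (t : Int) (acc : List Int),
    (cigar.foldl (fun (acc : Int × List Int) cs =>
      (acc.1 + (if cs.1 = 0 ∨ cs.1 = 2 ∨ cs.1 = 3 ∨ cs.1 = 4 then cs.2 else 0),
       acc.2 ++ [acc.1])) (t, acc)).2 = acc ++ pvOffs t cigar := by
  induction cigar with
  | nil => intro t acc; simp [pvOffs]
  | cons hd tl ih =>
    intro t acc
    obtain ⟨c, s⟩ := hd
    simp [pvOffs, pvDelta, List.foldl_cons, ih]

lemma zip_offs_eq (chrom : String) (st : Int) (cigar : List (Int × Int)) :
    ∀ t : Int,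
    (cigar.zip (pvOffs t cigar)).filterMap
      (fun p => if p.1.1 = 1 then some (chrom, st + p.2, p.1.2) else none)
      = pvGo chrom (st + t) cigar := by
  induction cigar with
  | nil => intro t; simp [pvGo]
  | cons hd tl ih =>
    intro t
    obtain ⟨c, s⟩ := hd
    by_cases h1 : c = 1
    · simp [pvOffs, pvGo, h1, ih, pvDelta]
    · simp [pvOffs, pvGo, h1, ih, add_assoc]

theorem fetch_insertion_spec : Claim_equal_fetch_insertion := by
  intro chrom st cigar _
  unfold Spec_fetch_insertion fetch_insertion fetch_insertion_alt pvOffsets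
  rw [foldA_eq, foldP_eq]
  simpa using (zip_offs_eq chrom st cigar 0).symm
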